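-- pv_equiv track=rewrite | github.com/sebasqr22/SimulaTec | main.py | calculateLocation
-- ===== SOURCE A (Python) =====
-- Xposible = [70, 140, 210, 280, 350, 420, 490, 560, 630, 700, 770, 840, 910]
--
-- Yposible = [170, 240, 310, 380, 450, 520]
--
-- def calculateLocation(pos):#Function to calculate location for objects
--     posx = pos[0]
--     posy = pos[1]
--     minx = []
--     miny = []
--     finalx = 0
--     finaly = 0
--
--     for distancex in Xposible:#determines the a list of the values of posx-pos1
--         minx.append(abs(pos[0]-distancex))
--
--     finalx = Xposible[minx.index(min(minx))] #determines closest posible x in the grid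
--
--     for distancey in Yposible:#determines the a list of the values of posy-pos1
--         miny.append(abs(pos[1]-distancey))
--
--     finaly = Yposible[miny.index(min(miny))]#determines closest posible y in the grid
--
--     return (finalx,finaly)
-- ===== SOURCE B (Python) =====
-- Xposible = [70, 140, 210, 280, 350, 420, 490, 560, 630, 700, 770, 840, 910]
--
-- Yposible = [170, 240, 310, 380, 450, 520]
--
-- def calculateLocation(pos):
--     # The grids are arithmetic progressions with step 70 (x = 70 + 70k, k=0..12;
--     # y = 170 + 70k, k=0..5), so the nearest grid point is a closed-form
--     # round-half-down (ties pick the smaller grid value, like a first-minimum scan)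
--     # followed by clamping to the grid range.  No scan over the grids at all.
--     def nearest(p, start, count):
--         k = -((start + 35 - p) // 70)  # round-half-down nearest index
--         if k < 0:
--             k = 0
--         elif k > count - 1:
--             k = count - 1
--         return start + 70 * k
--     return (nearest(pos[0], 70, 13), nearest(pos[1], 170, 6))
-- ===== Notes on version B (the rewrite author's own statement) =====
-- stated objective: faster
-- what changed: Exploits that both grids are fixed arithmetic progressions with step 70: B computes the nearest grid point by closed-form round-half-down division and clamping (O(1), no scan), instead of A's per-axis distance table + min + index + grid lookup.
import Mathlib
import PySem

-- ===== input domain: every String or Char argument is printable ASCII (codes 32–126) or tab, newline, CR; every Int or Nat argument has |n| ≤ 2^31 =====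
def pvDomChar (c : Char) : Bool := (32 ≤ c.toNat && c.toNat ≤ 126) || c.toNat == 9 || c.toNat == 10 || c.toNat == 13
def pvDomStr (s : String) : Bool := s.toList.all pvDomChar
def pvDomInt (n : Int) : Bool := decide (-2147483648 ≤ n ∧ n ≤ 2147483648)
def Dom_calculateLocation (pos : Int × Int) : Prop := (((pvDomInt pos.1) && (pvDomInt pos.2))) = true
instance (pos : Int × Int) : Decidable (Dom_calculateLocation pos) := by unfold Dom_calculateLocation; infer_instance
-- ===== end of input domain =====

-- B replaces A's per-axis scan (distance table, min, index, grid lookup) by closed-form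
-- round-half-down arithmetic, exploiting that both grids are step-70 arithmetic progressions.

-- ===== PORT A =====
def Xposible : List Int := [70, 140, 210, 280, 350, 420, 490, 560, 630, 700, 770, 840, 910]

def Yposible : List Int := [170, 240, 310, 380, 450, 520]

-- helper naming A's per-axis lookup 'grid[ds.index(min(ds))]' (the grid literals are
-- non-empty, so min/index/[] never raise; the 0 defaults only discharge the Options)
def pickA (grid : List Int) (ds : List Int) : Int :=
  ((PySem.List.min? ds (fun v => v)).bind (fun m =>
    (PySem.List.index? ds m).map (fun (i : Nat) => (PySem.List.pyGet? grid (i : Int)).getD 0))).getD 0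

-- literal port of A: build the list of absolute distances per axis, take its min,
-- find the min's first index, and index back into the grid
def calculateLocation (pos : Int × Int) : Int × Int :=
  let posx := pos.1
  let posy := pos.2
  let minx := Xposible.foldl (fun acc distancex => acc ++ [|posx - distancex|]) []
  let finalx := pickA Xposible minx
  let miny := Yposible.foldl (fun acc distancey => acc ++ [|posy - distancey|]) []
  let finaly := pickA Yposible miny
  (finalx, finaly)

-- ===== PORT B =====
-- literal port of Source B's nearest(p, start, count): round-half-down division, then clamp
def nearestB (p start count : Int) : Int :=
  let k := -(PySem.Int.floordiv (start + 35 - p) 70)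
  let k2 := if k < 0 then 0 else if k > count - 1 then count - 1 else k
  start + 70 * k2

def calculateLocation_alt (pos : Int × Int) : Int × Int :=
  (nearestB pos.1 70 13, nearestB pos.2 170 6)

-- ===== PRECONDITION & SPEC =====
def Spec_calculateLocation (pos : Int × Int) (out : Int × Int) : Prop := out = calculateLocation_alt pos
instance (pos : Int × Int) (out : Int × Int) : Decidable (Spec_calculateLocation pos out) := by unfold Spec_calculateLocation; infer_instance

-- ===== CLAIM (what is proved, stated in full; the proofs are below) =====
def Claim_equal_calculateLocation : Prop := ∀ (pos : Int × Int), Dom_calculateLocation pos → Spec_calculateLocation pos (calculateLocation pos)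

-- ===== LEMMAS AND PROOFS =====

-- reference "first minimum", computed by structural recursion (a tie keeps the earlier element)
def fmin (f : Int → Int) : List Int → Option Int
  | [] => none
  | x :: xs =>
    match fmin f xs with
    | none => some x
    | some m => if f m < f x then some m else some x

theorem fmin_cons_lt (f : Int → Int) (a y : Int) (ys : List Int) (h : f y < f a) :
    fmin f (a :: y :: ys) = fmin f (y :: ys) := by
  simp only [fmin]
  cases hm : fmin f ys with
  | none => simp [if_pos h]
  | some m =>
    by_cases h2 : f m < f y
    · simp [if_pos h2, if_pos (show f m < f a by omega)]
    · simp [if_neg h2, if_pos h]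

theorem fmin_cons_ge (f : Int → Int) (a y : Int) (ys : List Int) (h : ¬ f y < f a) :
    fmin f (a :: y :: ys) = fmin f (a :: ys) := by
  simp only [fmin]
  cases hm : fmin f ys with
  | none => simp [if_neg h]
  | some m =>
    by_cases h2 : f m < f y
    · simp [if_pos h2]
    · simp [if_neg h2, if_neg h, if_neg (show ¬ f m < f a by omega)]

theorem min?_eq_fmin (f : Int → Int) :
    ∀ (xs : List Int) (a : Int), PySem.List.min? (a :: xs) f = fmin f (a :: xs) := by
  intro xs
  induction xs with
  | nil => intro a; rfl
  | cons y ys ih =>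
    intro a
    by_cases h : f y < f a
    · have e1 : PySem.List.min? (a :: y :: ys) f = PySem.List.min? (y :: ys) f := by
        unfold PySem.List.min?
        simp only [List.foldl_cons]
        congr 1
        show (if f y < f a then some y else some a) = some y
        rw [if_pos h]
      rw [e1, ih y, fmin_cons_lt f a y ys h]
    · have e1 : PySem.List.min? (a :: y :: ys) f = PySem.List.min? (a :: ys) f := by
        unfold PySem.List.min?
        simp only [List.foldl_cons]
        congr 1
        show (if f y < f a then some y else some a) = some a
        rw [if_neg h]
      rw [e1, ih a, fmin_cons_ge f a y ys h]

theorem fmin_map (f : Int → Int) (xs : List Int) :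
    fmin (fun v => v) (xs.map f) = (fmin f xs).map f := by
  induction xs with
  | nil => rfl
  | cons x xs ih =>
    simp only [List.map_cons, fmin, ih]
    cases fmin f xs with
    | none => rfl
    | some m => by_cases h : f m < f x <;> simp [h]

theorem fmin_isSome (f : Int → Int) (x : Int) (xs : List Int) :
    ∃ m, fmin f (x :: xs) = some m := by
  simp only [fmin]
  cases fmin f xs with
  | none => exact ⟨x, rfl⟩
  | some m => by_cases h : f m < f x <;> simp [h]

theorem fmin_mem (f : Int → Int) :
    ∀ (xs : List Int) (m : Int), fmin f xs = some m → m ∈ xs := by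
  intro xs
  induction xs with
  | nil => intro m h; simp [fmin] at h
  | cons x xs ih =>
    intro m h
    cases hm : fmin f xs with
    | none => simp [fmin, hm] at h; simp [h]
    | some b =>
      simp only [fmin, hm] at h
      by_cases h2 : f b < f x
      · rw [if_pos h2, Option.some_inj] at h
        exact List.mem_cons_of_mem _ (h ▸ ih b hm)
      · rw [if_neg h2, Option.some_inj] at h
        simp [h]

-- A's per-axis (table, min, index, lookup) value equals the first-argmin over the grid
theorem pickA_eq_fmin (f : Int → Int) :
    ∀ (xs : List Int) (x : Int),
      pickA (x :: xs) ((x :: xs).map f) = (fmin f (x :: xs)).getD 0 := by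
  intro xs
  induction xs with
  | nil =>
    intro x
    simp [pickA, PySem.List.min?, fmin, PySem.List.index?, PySem.List.pyGet?,
      PySem.List.pyIdx?]
  | cons y ys ih =>
    intro x
    obtain ⟨b, hb⟩ := fmin_isSome f y ys
    have hminRest : PySem.List.min? ((y :: ys).map f) (fun v => v) = some (f b) := by
      rw [List.map_cons, min?_eq_fmin, ← List.map_cons, fmin_map, hb]; rfl
    have hfm : fmin f (x :: y :: ys) = if f b < f x then some b else some x := by
      have e : fmin f (x :: y :: ys)
          = match fmin f (y :: ys) with
            | none => some x
            | some m => if f m < f x then some m else some x := rfl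
      rw [e, hb]
    have hminFull : PySem.List.min? ((x :: y :: ys).map f) (fun v => v)
        = (if f b < f x then some b else some x).map f := by
      rw [List.map_cons, min?_eq_fmin, ← List.map_cons, fmin_map, hfm]
    by_cases h : f b < f x
    · have hne : f x ≠ f b := by omega
      have hbmem : f b ∈ (y :: ys).map f :=
        List.mem_map_of_mem (fmin_mem f (y :: ys) b hb)
      obtain ⟨i, hi⟩ := Option.isSome_iff_exists.mp
        ((PySem.List.index?_isSome_iff ((y :: ys).map f) (f b)).mpr hbmem)
      have ihy := ih y
      unfold pickA at ihy ⊢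
      rw [hminRest] at ihy
      simp only [Option.bind_some] at ihy
      rw [hi, hb] at ihy
      simp only [Option.map_some, Option.getD_some] at ihy
      rw [hminFull, if_pos h]
      simp only [Option.map_some, Option.bind_some]
      rw [List.map_cons, PySem.List.index?_cons_of_ne ((y :: ys).map f) hne, hi]
      simp only [Option.map_some, Option.getD_some]
      have hcast : ((i + 1 : Nat) : Int) = (i : Int) + 1 := by push_cast; ring
      rw [hcast, PySem.List.pyGet?_cons_succ, ihy, hfm, if_pos h]
      rfl
    · unfold pickA
      rw [hminFull, if_neg h]
      simp only [Option.map_some, Option.bind_some]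
      rw [List.map_cons, PySem.List.index?_cons_self]
      simp only [Option.map_some, Option.getD_some]
      rw [show ((0 : Nat) : Int) = 0 from rfl, PySem.List.pyGet?_zero_cons, hfm, if_neg h]

-- the step-70 arithmetic progression of length n starting at a
def gridList (a : Int) : Nat → List Int
  | 0 => []
  | n + 1 => a :: gridList (a + 70) n

-- closed form for the first argmin over a step-70 progression: round half down, clamp
theorem fmin_gridList (p : Int) :
    ∀ (n : Nat) (a : Int),
      fmin (fun d => |p - d|) (gridList a (n + 1))
        = some (a + 70 * (max 0 (min (n : Int) (-(PySem.Int.floordiv (a + 35 - p) 70))))) := by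
  intro n
  induction n with
  | zero =>
    intro a
    simp only [gridList, fmin]
    congr 1
    push_cast
    omega
  | succ n ih =>
    intro a
    have hq := (PySem.Int.floordiv_eq_iff_of_pos (a := a + 35 - p) (b := 70)
      (q := PySem.Int.floordiv (a + 35 - p) 70) (by omega)).mp rfl
    have hq' : PySem.Int.floordiv (a + 70 + 35 - p) 70 = PySem.Int.floordiv (a + 35 - p) 70 + 1 := by
      rw [PySem.Int.floordiv_eq_iff_of_pos (by omega)]
      constructor <;> nlinarith [hq.1, hq.2]
    have hstep : gridList a (n + 2) = a :: gridList (a + 70) (n + 1) := rfl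
    rw [hstep]
    have e : fmin (fun d => |p - d|) (a :: gridList (a + 70) (n + 1))
        = match fmin (fun d => |p - d|) (gridList (a + 70) (n + 1)) with
          | none => some a
          | some m => if |p - m| < |p - a| then some m else some a := rfl
    rw [e, ih (a + 70), hq']
    set q := PySem.Int.floordiv (a + 35 - p) 70 with hqdef
    obtain ⟨hq1, hq2⟩ := hq
    show (if |p - (a + 70 + 70 * (max 0 (min (n : Int) (-(q + 1)))))| < |p - a|
        then some (a + 70 + 70 * (max 0 (min (n : Int) (-(q + 1))))) else some a)
      = some (a + 70 * max 0 (min ((n + 1 : Nat) : Int) (-q)))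
    have hn : (0 : Int) ≤ (n : Int) := Int.natCast_nonneg n
    by_cases hk : 1 ≤ -q
    · have habs : |p - (a + 70 + 70 * (max 0 (min (n : Int) (-(q + 1)))))| < |p - a| := by
        rcases abs_cases (p - (a + 70 + 70 * (max 0 (min (n : Int) (-(q + 1)))))) with ⟨e1, s1⟩ | ⟨e1, s1⟩ <;>
          rcases abs_cases (p - a) with ⟨e2, s2⟩ | ⟨e2, s2⟩ <;> rw [e1, e2] <;> omega
      rw [if_pos habs]
      congr 1
      push_cast
      omega
    · have habs : ¬ |p - (a + 70 + 70 * (max 0 (min (n : Int) (-(q + 1)))))| < |p - a| := by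
        rcases abs_cases (p - (a + 70 + 70 * (max 0 (min (n : Int) (-(q + 1)))))) with ⟨e1, s1⟩ | ⟨e1, s1⟩ <;>
          rcases abs_cases (p - a) with ⟨e2, s2⟩ | ⟨e2, s2⟩ <;> rw [e1, e2] <;> omega
      rw [if_neg habs]
      congr 1
      push_cast
      omega

theorem nearestB_eq (p a n : Int) (hn : 1 ≤ n) :
    nearestB p a n = a + 70 * (max 0 (min (n - 1) (-(PySem.Int.floordiv (a + 35 - p) 70)))) := by
  simp only [nearestB]
  generalize -(PySem.Int.floordiv (a + 35 - p) 70) = k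
  split_ifs <;> omega

-- ===== VERDICT (by name: the statement is the Claim_ definition above) =====
theorem calculateLocation_spec : Claim_equal_calculateLocation := by
  intro pos _
  unfold Spec_calculateLocation calculateLocation calculateLocation_alt
  simp only [PySem.List.foldl_append_singleton_eq_map, List.nil_append]
  have hx : Xposible.map (fun d => |pos.1 - d|)
      = (70 :: [140, 210, 280, 350, 420, 490, 560, 630, 700, 770, 840, 910]).map
          (fun d => |pos.1 - d|) := rfl
  have hy : Yposible.map (fun d => |pos.2 - d|)
      = (170 :: [240, 310, 380, 450, 520]).map (fun d => |pos.2 - d|) := rfl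
  rw [hx, hy,
    show Xposible = 70 :: [140, 210, 280, 350, 420, 490, 560, 630, 700, 770, 840, 910] from rfl,
    show Yposible = 170 :: [240, 310, 380, 450, 520] from rfl,
    pickA_eq_fmin, pickA_eq_fmin,
    show (70 : Int) :: [140, 210, 280, 350, 420, 490, 560, 630, 700, 770, 840, 910]
      = gridList 70 13 from by decide,
    show (170 : Int) :: [240, 310, 380, 450, 520] = gridList 170 6 from by decide,
    show (13 : Nat) = 12 + 1 from rfl, show (6 : Nat) = 5 + 1 from rfl,
    fmin_gridList, fmin_gridList,
    nearestB_eq pos.1 70 13 (by omega), nearestB_eq pos.2 170 6 (by omega)]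
  norm_num
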